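-- pv_equiv track=rewrite | github.com/fmalina/locality | locality/variants.py | shorten_street
-- ===== SOURCE A (Python) =====
-- def shorten_street(x):
--     """Conventionally shorten various street names."""
--
--     d = {
--         ' Street': ' St',
--         ' Road': ' Rd',
--         ' Drive': ' Dr',
--         ' Lane': ' Ln',
--         ' Park': ' Pk',
--         ' Close': ' Cl',
--         ' Avenue': ' Ave',
--     }
--     for k, v in d.items():
--         x = x.replace(k, v)\
--              .replace(k.lower(), v)
--     return x.strip()
-- ===== SOURCE B (Python) =====
-- TABLE = {
--     ' Street': ' St', ' street': ' St',
--     ' Road': ' Rd', ' road': ' Rd',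
--     ' Drive': ' Dr', ' drive': ' Dr',
--     ' Lane': ' Ln', ' lane': ' Ln',
--     ' Park': ' Pk', ' park': ' Pk',
--     ' Close': ' Cl', ' close': ' Cl',
--     ' Avenue': ' Ave', ' avenue': ' Ave',
-- }
--
--
-- def shorten_street(x):
--     """Conventionally shorten various street names."""
--     out = []
--     i = 0
--     while i < len(x):
--         for k, v in TABLE.items():
--             if x.startswith(k, i):
--                 out.append(v)
--                 i += len(k)
--                 break
--         else:
--             out.append(x[i])
--             i += 1
--     return ''.join(out).strip()
-- ===== Notes on version B (the rewrite author's own statement) =====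
-- stated objective: alternative
-- what changed: B replaces A's 14 sequential full-string replace passes (one per suffix variant) by a single left-to-right scan that at each position probes one 14-entry lookup table, emits the abbreviation and jumps past the match.
import Mathlib
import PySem

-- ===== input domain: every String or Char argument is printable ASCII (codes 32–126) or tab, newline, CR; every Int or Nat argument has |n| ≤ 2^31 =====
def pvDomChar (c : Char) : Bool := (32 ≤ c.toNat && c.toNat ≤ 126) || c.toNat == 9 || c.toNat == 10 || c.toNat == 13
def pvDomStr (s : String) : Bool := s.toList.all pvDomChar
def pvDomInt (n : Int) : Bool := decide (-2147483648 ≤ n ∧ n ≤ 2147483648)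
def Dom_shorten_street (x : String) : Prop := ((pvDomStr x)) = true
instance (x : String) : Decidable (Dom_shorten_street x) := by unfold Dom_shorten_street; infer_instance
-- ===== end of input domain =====

-- B replaces A's 14 sequential full-string replace passes by one left-to-right scan with a
-- 14-entry lookup table, emitting each abbreviation as it goes (alternative single-pass algorithm).

-- ===== PORT A =====
-- the dict literal of A, as an association list in insertion order
def pvItems : List (String × String) :=
  [(" Street", " St"), (" Road", " Rd"), (" Drive", " Dr"), (" Lane", " Ln"),
   (" Park", " Pk"), (" Close", " Cl"), (" Avenue", " Ave")]

-- for k, v in d.items(): x = x.replace(k, v).replace(k.lower(), v); return x.strip()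
def shorten_street (x : String) : String :=
  String.ofList (PySem.Chars.strip
    (pvItems.foldl
      (fun s kv =>
        PySem.Chars.replace (PySem.Chars.replace s kv.1.toList kv.2.toList)
          (PySem.Chars.lower kv.1.toList) kv.2.toList)
      x.toList))

-- ===== PORT B =====
-- Source B's TABLE dict, in insertion order (Chars level)
def pvTab : List (List Char × List Char) :=
  [(" Street".toList, " St".toList), (" street".toList, " St".toList),
   (" Road".toList, " Rd".toList), (" road".toList, " Rd".toList),
   (" Drive".toList, " Dr".toList), (" drive".toList, " Dr".toList),
   (" Lane".toList, " Ln".toList), (" lane".toList, " Ln".toList),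
   (" Park".toList, " Pk".toList), (" park".toList, " Pk".toList),
   (" Close".toList, " Cl".toList), (" close".toList, " Cl".toList),
   (" Avenue".toList, " Ave".toList), (" avenue".toList, " Ave".toList)]

-- the inner 'for k, v in TABLE.items(): if x.startswith(k, i): … break / else: …' of Source B
def pvFind : List (List Char × List Char) → List Char → Option (List Char × List Char)
  | [], _ => none
  | (k, v) :: ps, l => if PySem.Chars.startswith l k then some (k, v) else pvFind ps l

-- the while loop of Source B over the remaining suffix, with fuel as the totality guard
-- (each step consumes at least one character, so fuel = length runs it to completion)
def pvScanF : Nat → List Char → List Char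
  | 0, _ => []
  | _ + 1, [] => []
  | f + 1, c :: r =>
    match pvFind pvTab (c :: r) with
    | some (k, v) => v ++ pvScanF f ((c :: r).drop k.length)
    | none => c :: pvScanF f r

-- return ''.join(out).strip()
def shorten_street_alt (x : String) : String :=
  String.ofList (PySem.Chars.strip (pvScanF x.toList.length x.toList))

-- ===== PRECONDITION & SPEC =====
def Spec_shorten_street (x : String) (out : String) : Prop := out = shorten_street_alt x
instance (x : String) (out : String) : Decidable (Spec_shorten_street x out) := by unfold Spec_shorten_street; infer_instance

-- ===== CLAIM (what is proved, stated in full; the proofs are below) =====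
def Claim_equal_shorten_street : Prop := ∀ (x : String), Dom_shorten_street x → Spec_shorten_street x (shorten_street x)

-- ===== LEMMAS AND PROOFS =====

-- A's key tails / values without their leading space, paired per single replace pass
def pvPairs : List (List Char × List Char) :=
  [("Street".toList, "St".toList), ("street".toList, "St".toList),
   ("Road".toList, "Rd".toList), ("road".toList, "Rd".toList),
   ("Drive".toList, "Dr".toList), ("drive".toList, "Dr".toList),
   ("Lane".toList, "Ln".toList), ("lane".toList, "Ln".toList),
   ("Park".toList, "Pk".toList), ("park".toList, "Pk".toList),
   ("Close".toList, "Cl".toList), ("close".toList, "Cl".toList),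
   ("Avenue".toList, "Ave".toList), ("avenue".toList, "Ave".toList)]

-- first-match prefix rewrite of one token (proof-side characterisation of both programs)
def pvFix : List (List Char × List Char) → List Char → List Char
  | [], t => t
  | (k, v) :: ps, t =>
      if PySem.Chars.startswith t k then v ++ t.drop k.length else pvFix ps t

-- one replaced token: if k is a prefix of t, rewrite it to v, else leave t
def pvPfx (k v t : List Char) : List Char :=
  if k.isPrefixOf t then v ++ t.drop k.length else t

-- pure splitter: pvSplitP cur l = tokens of cur ++ l when splitting on ' '
def pvSplitP : List Char → List Char → List (List Char)
  | cur, [] => [cur]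
  | cur, c :: r => if c = ' ' then cur :: pvSplitP [] r else pvSplitP (cur ++ [c]) r

theorem pvIntercalate_cons (ts : List (List Char)) (t : List Char) :
    List.intercalate [' '] (t :: ts) = t ++ ts.flatMap (fun u => ' ' :: u) := by
  induction ts generalizing t with
  | nil => simp [List.intercalate]
  | cons h tl ih => simp [List.intercalate, List.intersperse] at ih ⊢; simp [ih]

theorem pvSplitP_ne_nil (l cur : List Char) : pvSplitP cur l ≠ [] := by
  induction l generalizing cur with
  | nil => simp [pvSplitP]
  | cons c r ih => by_cases hc : c = ' ' <;> simp [pvSplitP, hc, ih]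

theorem pvSplitP_join (l : List Char) : ∀ (cur : List Char),
    List.intercalate [' '] (pvSplitP cur l) = cur ++ l := by
  induction l with
  | nil => intro cur; simp [pvSplitP, List.intercalate]
  | cons c r ih =>
    intro cur
    by_cases hc : c = ' '
    · subst hc
      rw [show pvSplitP cur (' ' :: r) = cur :: pvSplitP [] r from by simp [pvSplitP]]
      obtain ⟨h0, tl, hts⟩ : ∃ h0 tl, pvSplitP [] r = h0 :: tl := by
        cases e : pvSplitP [] r with
        | nil => exact absurd e (pvSplitP_ne_nil r [])
        | cons a b => exact ⟨a, b, rfl⟩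
      have ihr := ih []
      rw [hts, pvIntercalate_cons] at ihr
      rw [hts, pvIntercalate_cons]
      simp only [List.flatMap_cons] at ihr ⊢
      simp at ihr ⊢
      simp [ihr]
    · have := ih (cur ++ [c])
      simp only [pvSplitP, hc, if_false]
      rw [this]
      simp

theorem pvSplitP_spaceFree (l : List Char) : ∀ (cur : List Char), (∀ c ∈ cur, c ≠ ' ') →
    ∀ t ∈ pvSplitP cur l, ∀ c ∈ t, c ≠ ' ' := by
  induction l with
  | nil => intro cur hcur t ht; simp [pvSplitP] at ht; subst ht; exact hcur
  | cons c r ih =>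
    intro cur hcur t ht
    by_cases hc : c = ' '
    · subst hc
      simp only [pvSplitP, if_true] at ht
      rcases List.mem_cons.mp ht with rfl | ht'
      · exact hcur
      · exact ih [] (by simp) t ht'
    · simp only [pvSplitP, hc, if_false] at ht
      refine ih (cur ++ [c]) ?_ t ht
      intro d hd
      rcases List.mem_append.mp hd with h | h
      · exact hcur d h
      · simp at h; subst h; exact hc

-- scanning a space-free chunk with key ' '::w never matches (A's replace.go)
theorem pvGoSkip (w new : List Char) (a : List Char) :
    ∀ (fuel : Nat) (l acc : List Char), (∀ c ∈ a, c ≠ ' ') → a.length ≤ fuel →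
    PySem.Chars.replace.go (' ' :: w) new fuel (a ++ l) acc
      = PySem.Chars.replace.go (' ' :: w) new (fuel - a.length) l (a.reverse ++ acc) := by
  induction a with
  | nil => intro fuel l acc _ _; simp
  | cons c a ih =>
    intro fuel l acc hsf hf
    obtain ⟨f, rfl⟩ : ∃ f, fuel = f + 1 := ⟨fuel - 1, by simp at hf; omega⟩
    have hc : c ≠ ' ' := hsf c (by simp)
    rw [List.cons_append, PySem.Chars.replace.go]
    have hpre : (' ' :: w).isPrefixOf (c :: (a ++ l)) = false := by
      simp [List.isPrefixOf]; exact fun h => absurd h.symm hc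
    rw [hpre]
    simp only [Bool.false_eq_true, if_false]
    rw [ih f l (c :: acc) (fun d hd => hsf d (by simp [hd])) (by simp at hf; omega)]
    rw [show f + 1 - (c :: a).length = f - a.length from by simp]
    simp [List.append_assoc]

theorem pvFlatShape (ts : List (List Char)) :
    ts.flatMap (fun t => ' ' :: t) = [] ∨ ∃ r, ts.flatMap (fun t => ' ' :: t) = ' ' :: r := by
  cases ts with
  | nil => left; simp
  | cons t ts => right; exact ⟨t ++ ts.flatMap (fun t => ' ' :: t), by simp⟩

-- key matches at a separator iff it matches the following token alone
theorem pvPrefixToken (w t rest : List Char) (hw : w ≠ []) (hwsf : ∀ c ∈ w, c ≠ ' ')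
    (hr : rest = [] ∨ ∃ r, rest = ' ' :: r) :
    w.isPrefixOf (t ++ rest) = w.isPrefixOf t := by
  rcases hb : w.isPrefixOf t with _ | _
  · have hbt : ¬ w <+: t := by
      rw [← List.isPrefixOf_iff_prefix, hb]; simp
    have h2 : ¬ w <+: t ++ rest := by
      intro hh
      rcases List.prefix_or_prefix_of_prefix hh (List.prefix_append t rest) with h3 | h3
      · exact hbt h3
      · obtain ⟨w', rfl⟩ := h3
        have hw' : w' <+: rest := (List.prefix_append_right_inj t).mp hh
        rcases hr with rfl | ⟨r, rfl⟩
        · have : w' = [] := List.prefix_nil.mp hw'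
          subst this
          exact hbt (by simp)
        · cases w' with
          | nil => exact hbt (by simp)
          | cons d w'' =>
            obtain ⟨k, hk⟩ := hw'
            have hd : d = ' ' := by
              have h5 := congrArg List.head? hk
              simp at h5
              exact h5
            exact hwsf d (by simp) hd
    rw [← Bool.not_eq_true, List.isPrefixOf_iff_prefix]
    exact h2
  · have hbt : w <+: t := List.isPrefixOf_iff_prefix.mp hb
    rw [List.isPrefixOf_iff_prefix]
    exact hbt.trans (List.prefix_append t rest)

-- A's replace scan over a flatMap of space-free tokens rewrites each token's prefix independently
theorem pvGoTokens (w u : List Char) (hw : w ≠ []) (hwsf : ∀ c ∈ w, c ≠ ' ') :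
    ∀ (ts : List (List Char)) (fuel : Nat) (acc : List Char),
    (∀ t ∈ ts, ∀ c ∈ t, c ≠ ' ') →
    (ts.flatMap (fun t => ' ' :: t)).length ≤ fuel →
    PySem.Chars.replace.go (' ' :: w) (' ' :: u) fuel (ts.flatMap (fun t => ' ' :: t)) acc
      = acc.reverse ++ ts.flatMap (fun t => ' ' :: pvPfx w u t) := by
  intro ts
  induction ts with
  | nil =>
    intro fuel acc _ _
    cases fuel <;> simp [PySem.Chars.replace.go]
  | cons t ts ih =>
    intro fuel acc hsf hf
    simp only [List.flatMap_cons, List.cons_append, List.length_cons, List.length_append] at hf ⊢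
    obtain ⟨f, rfl⟩ : ∃ f, fuel = f + 1 := ⟨fuel - 1, by omega⟩
    rw [PySem.Chars.replace.go]
    have htok : ∀ c ∈ t, c ≠ ' ' := hsf t (by simp)
    have hguard : (' ' :: w).isPrefixOf (' ' :: (t ++ ts.flatMap (fun t => ' ' :: t))) = w.isPrefixOf t := by
      simp only [List.isPrefixOf]
      rw [pvPrefixToken w t _ hw hwsf (pvFlatShape ts)]
      simp
    rw [hguard]
    cases hm : w.isPrefixOf t with
    | false =>
      simp only [Bool.false_eq_true, if_false]
      rw [pvGoSkip w (' ' :: u) t f (ts.flatMap (fun t => ' ' :: t)) (' ' :: acc) htok (by omega)]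
      rw [ih (f - t.length) (t.reverse ++ ' ' :: acc) (fun t' ht' => hsf t' (by simp [ht'])) (by omega)]
      simp [pvPfx, hm]
    | true =>
      simp only [if_true]
      have hlen : w.length ≤ t.length := (List.isPrefixOf_iff_prefix.mp hm).length_le
      rw [show List.drop (' ' :: w).length (' ' :: (t ++ ts.flatMap (fun t => ' ' :: t)))
            = t.drop w.length ++ ts.flatMap (fun t => ' ' :: t) from by
        simp [List.drop_append_of_le_length hlen]]
      rw [pvGoSkip w (' ' :: u) (t.drop w.length) f (ts.flatMap (fun t => ' ' :: t))
            ((' ' :: u).reverse ++ acc) (fun c hc => htok c (List.mem_of_mem_drop hc))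
            (by simp only [List.length_drop]; omega)]
      rw [ih (f - (t.drop w.length).length) _ (fun t' ht' => hsf t' (by simp [ht']))
            (by simp only [List.length_drop]; omega)]
      simp [pvPfx, hm]

-- one full replace pass on a tokenised string rewrites each token's prefix
theorem pvReplaceJoin (w u t0 : List Char) (ts : List (List Char)) (hw : w ≠ [])
    (hwsf : ∀ c ∈ w, c ≠ ' ') (h0 : ∀ c ∈ t0, c ≠ ' ') (hts : ∀ t ∈ ts, ∀ c ∈ t, c ≠ ' ') :
    PySem.Chars.replace (t0 ++ ts.flatMap (fun t => ' ' :: t)) (' ' :: w) (' ' :: u)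
      = t0 ++ ts.flatMap (fun t => ' ' :: pvPfx w u t) := by
  unfold PySem.Chars.replace
  simp only [List.isEmpty_cons, Bool.false_eq_true, if_false]
  rw [pvGoSkip w (' ' :: u) t0 (t0 ++ ts.flatMap (fun t => ' ' :: t)).length
        (ts.flatMap (fun t => ' ' :: t)) [] h0 (by simp)]
  rw [pvGoTokens w u hw hwsf ts _ _ hts (by simp)]
  simp

-- a rewritten token is still space-free
theorem pvPfx_spaceFree (k v t : List Char) (hv : ∀ c ∈ v, c ≠ ' ') (ht : ∀ c ∈ t, c ≠ ' ') :
    ∀ c ∈ pvPfx k v t, c ≠ ' ' := by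
  intro c hc
  unfold pvPfx at hc
  split at hc
  · rcases List.mem_append.mp hc with h | h
    · exact hv c h
    · exact ht c (List.mem_of_mem_drop h)
  · exact ht c hc

-- the whole chain of replace passes acts tokenwise as a fold of prefix rewrites
theorem pvChain (ps : List (List Char × List Char)) : ∀ (t0 : List Char) (ts : List (List Char)),
    (∀ p ∈ ps, p.1 ≠ [] ∧ (∀ c ∈ p.1, c ≠ ' ') ∧ (∀ c ∈ p.2, c ≠ ' ')) →
    (∀ c ∈ t0, c ≠ ' ') → (∀ t ∈ ts, ∀ c ∈ t, c ≠ ' ') →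
    ps.foldl (fun s p => PySem.Chars.replace s (' ' :: p.1) (' ' :: p.2))
        (t0 ++ ts.flatMap (fun t => ' ' :: t))
      = t0 ++ (ts.map (fun t => ps.foldl (fun t p => pvPfx p.1 p.2 t) t)).flatMap
          (fun t => ' ' :: t) := by
  induction ps with
  | nil => intro t0 ts _ _ _; simp
  | cons p ps ih =>
    intro t0 ts hps h0 hts
    obtain ⟨hne, hksf, hvsf⟩ := hps p (by simp)
    simp only [List.foldl_cons]
    rw [pvReplaceJoin p.1 p.2 t0 ts hne hksf h0 hts]
    rw [show ts.flatMap (fun t => ' ' :: pvPfx p.1 p.2 t)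
          = (ts.map (pvPfx p.1 p.2)).flatMap (fun t => ' ' :: t) from by
      simp [List.flatMap_map]]
    rw [ih t0 (ts.map (pvPfx p.1 p.2)) (fun q hq => hps q (by simp [hq]))
          h0 (by
            intro t ht
            obtain ⟨t', ht', rfl⟩ := List.mem_map.mp ht
            exact pvPfx_spaceFree p.1 p.2 t' hvsf (hts t' ht'))]
    simp [List.map_map, Function.comp_def]

-- folding all prefix rewrites over one token is the same as the first-match rewrite
theorem pvFoldPfx_id (ps : List (List Char × List Char)) (t : List Char)
    (h : ∀ p ∈ ps, ¬ p.1 <+: t) :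
    ps.foldl (fun t p => pvPfx p.1 p.2 t) t = t := by
  induction ps with
  | nil => rfl
  | cons p ps ih =>
    simp only [List.foldl_cons]
    rw [show pvPfx p.1 p.2 t = t from by
      unfold pvPfx
      rw [if_neg]
      simp only [List.isPrefixOf_iff_prefix]
      exact h p (by simp)]
    exact ih (fun q hq => h q (by simp [hq]))

theorem pvFoldPfx_eq_fix (ps : List (List Char × List Char))
    (h : ps.Pairwise (fun p q => ¬ q.1 <+: p.2 ∧ ¬ p.2 <+: q.1)) : ∀ (t : List Char),
    ps.foldl (fun t p => pvPfx p.1 p.2 t) t = pvFix ps t := by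
  induction ps with
  | nil => intro t; rfl
  | cons p ps ih =>
    obtain ⟨k, v⟩ := p
    intro t
    obtain ⟨hhead, htail⟩ := List.pairwise_cons.mp h
    simp only [List.foldl_cons]
    cases hm : k.isPrefixOf t with
    | true =>
      rw [show pvPfx k v t = v ++ t.drop k.length from by simp [pvPfx, hm]]
      rw [pvFoldPfx_id ps _ (by
        intro q hq hcontra
        rcases List.prefix_or_prefix_of_prefix hcontra (List.prefix_append v (t.drop k.length))
          with h3 | h3
        · exact (hhead q hq).1 h3
        · exact (hhead q hq).2 h3)]
      rw [show pvFix ((k, v) :: ps) t = v ++ t.drop k.length from by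
        simp [pvFix, PySem.Chars.startswith, hm]]
    | false =>
      rw [show pvPfx k v t = t from by simp [pvPfx, hm]]
      rw [show pvFix ((k, v) :: ps) t = pvFix ps t from by
        simp [pvFix, PySem.Chars.startswith, hm]]
      exact ih htail t

-- side conditions of the concrete table, by computation
theorem pvPairsCond : ∀ p ∈ pvPairs, p.1 ≠ [] ∧ (∀ c ∈ p.1, c ≠ ' ') ∧ (∀ c ∈ p.2, c ≠ ' ') := by
  have h : (pvPairs.all fun p =>
      (!p.1.isEmpty) && (p.1.all fun c => c != ' ') && (p.2.all fun c => c != ' ')) = true := by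
    decide
  simp only [List.all_eq_true, Bool.and_eq_true, bne_iff_ne, ne_eq, Bool.not_eq_true'] at h
  intro p hp
  obtain ⟨⟨h1, h2⟩, h3⟩ := h p hp
  refine ⟨?_, h2, h3⟩
  simpa [List.isEmpty_iff] using h1

-- boolean pairwise check used only to get `decide` through
def pvPairwiseB : List (List Char × List Char) → Bool
  | [] => true
  | p :: ps => (ps.all fun q => !(q.1.isPrefixOf p.2) && !(p.2.isPrefixOf q.1)) && pvPairwiseB ps

theorem pvPairwiseB_sound (ps : List (List Char × List Char)) (h : pvPairwiseB ps = true) :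
    ps.Pairwise (fun p q => ¬ q.1 <+: p.2 ∧ ¬ p.2 <+: q.1) := by
  induction ps with
  | nil => exact List.Pairwise.nil
  | cons p ps ih =>
    simp only [pvPairwiseB, Bool.and_eq_true, List.all_eq_true] at h
    refine List.Pairwise.cons ?_ (ih h.2)
    intro q hq
    have hb := h.1 q hq
    simp only [Bool.not_eq_true', ← Bool.not_eq_true] at hb
    constructor
    · rw [← List.isPrefixOf_iff_prefix]; simp [hb.1]
    · rw [← List.isPrefixOf_iff_prefix]; simp [hb.2]

theorem pvPairsPairwise : pvPairs.Pairwise (fun p q => ¬ q.1 <+: p.2 ∧ ¬ p.2 <+: q.1) :=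
  pvPairwiseB_sound pvPairs (by decide)

-- A's seven two-replace passes are the fourteen single replaces over pvPairs, keys split as ' '::w
theorem pvAFold (s : List Char) :
    pvItems.foldl
      (fun s kv =>
        PySem.Chars.replace (PySem.Chars.replace s kv.1.toList kv.2.toList)
          (PySem.Chars.lower kv.1.toList) kv.2.toList) s
    = pvPairs.foldl (fun s p => PySem.Chars.replace s (' ' :: p.1) (' ' :: p.2)) s := by
  have e1 : (" Street" : String).toList = ' ' :: "Street".toList := by decide
  have e2 : (" Road" : String).toList = ' ' :: "Road".toList := by decide
  have e3 : (" Drive" : String).toList = ' ' :: "Drive".toList := by decide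
  have e4 : (" Lane" : String).toList = ' ' :: "Lane".toList := by decide
  have e5 : (" Park" : String).toList = ' ' :: "Park".toList := by decide
  have e6 : (" Close" : String).toList = ' ' :: "Close".toList := by decide
  have e7 : (" Avenue" : String).toList = ' ' :: "Avenue".toList := by decide
  have l1 : PySem.Chars.lower (' ' :: "Street".toList) = ' ' :: "street".toList := by decide
  have l2 : PySem.Chars.lower (' ' :: "Road".toList) = ' ' :: "road".toList := by decide
  have l3 : PySem.Chars.lower (' ' :: "Drive".toList) = ' ' :: "drive".toList := by decide
  have l4 : PySem.Chars.lower (' ' :: "Lane".toList) = ' ' :: "lane".toList := by decide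
  have l5 : PySem.Chars.lower (' ' :: "Park".toList) = ' ' :: "park".toList := by decide
  have l6 : PySem.Chars.lower (' ' :: "Close".toList) = ' ' :: "close".toList := by decide
  have l7 : PySem.Chars.lower (' ' :: "Avenue".toList) = ' ' :: "avenue".toList := by decide
  have v1 : (" St" : String).toList = ' ' :: "St".toList := by decide
  have v2 : (" Rd" : String).toList = ' ' :: "Rd".toList := by decide
  have v3 : (" Dr" : String).toList = ' ' :: "Dr".toList := by decide
  have v4 : (" Ln" : String).toList = ' ' :: "Ln".toList := by decide
  have v5 : (" Pk" : String).toList = ' ' :: "Pk".toList := by decide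
  have v6 : (" Cl" : String).toList = ' ' :: "Cl".toList := by decide
  have v7 : (" Ave" : String).toList = ' ' :: "Ave".toList := by decide
  simp only [pvItems, pvPairs, List.foldl_cons, List.foldl_nil,
    e1, e2, e3, e4, e5, e6, e7, l1, l2, l3, l4, l5, l6, l7, v1, v2, v3, v4, v5, v6, v7]

-- ===== lemmas about B's single scan =====

-- the table of Source B is the spaced form of pvPairs
theorem pvTab_eq : pvTab = pvPairs.map (fun p => (' ' :: p.1, ' ' :: p.2)) := by decide

-- pvFix expressed through pvFind
theorem pvFix_eq_find (ps : List (List Char × List Char)) (t : List Char) :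
    pvFix ps t = match pvFind ps t with
      | some (k, v) => v ++ t.drop k.length
      | none => t := by
  induction ps with
  | nil => rfl
  | cons p ps ih =>
    obtain ⟨k, v⟩ := p
    simp only [pvFix, pvFind]
    cases hm : PySem.Chars.startswith t k <;> simp [ih]

theorem pvFind_some_prefix (ps : List (List Char × List Char)) (t k v : List Char)
    (h : pvFind ps t = some (k, v)) : k <+: t := by
  induction ps with
  | nil => simp [pvFind] at h
  | cons p ps ih =>
    obtain ⟨k', v'⟩ := p
    simp only [pvFind] at h
    split at h
    · rename_i hg
      obtain ⟨rfl, rfl⟩ : k' = k ∧ v' = v := by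
        simpa using h
      simp only [PySem.Chars.startswith] at hg
      exact List.isPrefixOf_iff_prefix.mp hg
    · exact ih h

-- matching the spaced table at a separator = matching the plain table on the token
theorem pvFind_spaced (ps : List (List Char × List Char)) (t rest : List Char)
    (hps : ∀ p ∈ ps, p.1 ≠ [] ∧ (∀ c ∈ p.1, c ≠ ' '))
    (hr : rest = [] ∨ ∃ r, rest = ' ' :: r) :
    pvFind (ps.map (fun p => (' ' :: p.1, ' ' :: p.2))) (' ' :: (t ++ rest))
      = (pvFind ps t).map (fun p => (' ' :: p.1, ' ' :: p.2)) := by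
  induction ps with
  | nil => rfl
  | cons p ps ih =>
    obtain ⟨k, v⟩ := p
    obtain ⟨hne, hsf⟩ := hps (k, v) (by simp)
    simp only [List.map_cons, pvFind]
    have hg : PySem.Chars.startswith (' ' :: (t ++ rest)) (' ' :: k)
        = PySem.Chars.startswith t k := by
      simp only [PySem.Chars.startswith, List.isPrefixOf]
      rw [pvPrefixToken k t rest hne hsf hr]
      simp
    rw [hg]
    cases hm : PySem.Chars.startswith t k with
    | true => simp
    | false =>
      simp only [Bool.false_eq_true, if_false]
      exact ih (fun q hq => hps q (by simp [hq]))

-- no key starts before a separator: on a non-space head the table never matches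
theorem pvFind_tab_none (c : Char) (r : List Char) (hc : c ≠ ' ') :
    pvFind pvTab (c :: r) = none := by
  rw [pvTab_eq]
  have : ∀ ps : List (List Char × List Char),
      pvFind (ps.map (fun p => (' ' :: p.1, ' ' :: p.2))) (c :: r) = none := by
    intro ps
    induction ps with
    | nil => rfl
    | cons p ps ih =>
      simp only [List.map_cons, pvFind]
      have : PySem.Chars.startswith (c :: r) (' ' :: p.1) = false := by
        simp only [PySem.Chars.startswith, List.isPrefixOf]
        simp
        exact fun h => absurd h.symm hc
      rw [this]
      simp [ih]
  exact this pvPairs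

-- the scan copies a space-free chunk verbatim
theorem pvScan_copy (a : List Char) : ∀ (fuel : Nat) (l : List Char),
    (∀ c ∈ a, c ≠ ' ') → a.length ≤ fuel →
    pvScanF fuel (a ++ l) = a ++ pvScanF (fuel - a.length) l := by
  induction a with
  | nil => intro fuel l _ _; simp
  | cons c a ih =>
    intro fuel l hsf hf
    obtain ⟨f, rfl⟩ : ∃ f, fuel = f + 1 := ⟨fuel - 1, by simp at hf; omega⟩
    have hc : c ≠ ' ' := hsf c (by simp)
    rw [List.cons_append, pvScanF, pvFind_tab_none c _ hc]
    rw [ih f l (fun d hd => hsf d (by simp [hd])) (by simp at hf; omega)]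
    simp

-- the scan over a flatMap of space-free tokens is tokenwise pvFix
theorem pvScan_tokens : ∀ (ts : List (List Char)) (fuel : Nat),
    (∀ t ∈ ts, ∀ c ∈ t, c ≠ ' ') →
    (ts.flatMap (fun t => ' ' :: t)).length ≤ fuel →
    pvScanF fuel (ts.flatMap (fun t => ' ' :: t))
      = (ts.map (pvFix pvPairs)).flatMap (fun t => ' ' :: t) := by
  intro ts
  induction ts with
  | nil => intro fuel _ _; cases fuel <;> simp [pvScanF]
  | cons t ts ih =>
    intro fuel hsf hf
    simp only [List.flatMap_cons, List.map_cons, List.length_cons, List.length_append] at hf ⊢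
    obtain ⟨f, rfl⟩ : ∃ f, fuel = f + 1 := ⟨fuel - 1, by simp at hf; omega⟩
    have htok : ∀ c ∈ t, c ≠ ' ' := hsf t (by simp)
    rw [show (' ' :: t) ++ ts.flatMap (fun t => ' ' :: t)
          = ' ' :: (t ++ ts.flatMap (fun t => ' ' :: t)) from by simp]
    rw [pvScanF, pvTab_eq,
      pvFind_spaced pvPairs t _ (fun p hp => ⟨(pvPairsCond p hp).1, (pvPairsCond p hp).2.1⟩)
        (pvFlatShape ts)]
    cases hfind : pvFind pvPairs t with
    | none =>
      simp only [Option.map_none]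
      rw [show pvFix pvPairs t = t from by rw [pvFix_eq_find, hfind]]
      rw [pvScan_copy t f _ htok (by omega)]
      rw [ih (f - t.length) (fun t' ht' => hsf t' (by simp [ht'])) (by omega)]
      simp
    | some p =>
      obtain ⟨w, u⟩ := p
      have hpre : w <+: t := pvFind_some_prefix pvPairs t w u hfind
      have hlen : w.length ≤ t.length := hpre.length_le
      simp only [Option.map_some]
      rw [show pvFix pvPairs t = u ++ t.drop w.length from by rw [pvFix_eq_find, hfind]]
      rw [show (' ' :: (t ++ ts.flatMap (fun t => ' ' :: t))).drop (' ' :: w).length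
            = t.drop w.length ++ ts.flatMap (fun t => ' ' :: t) from by
        simp [List.drop_append_of_le_length hlen]]
      rw [pvScan_copy (t.drop w.length) f _ (fun c hc => htok c (List.mem_of_mem_drop hc))
            (by simp only [List.length_drop] at hf ⊢; omega)]
      rw [ih (f - (t.drop w.length).length) (fun t' ht' => hsf t' (by simp [ht']))
            (by simp only [List.length_drop] at hf ⊢; omega)]
      simp

-- ===== VERDICT (by name: the statement is the Claim_ definition above) =====
theorem shorten_street_spec : Claim_equal_shorten_street := by
  unfold Claim_equal_shorten_street Spec_shorten_street
  intro x _
  obtain ⟨t0, ts, hsplit⟩ : ∃ t0 ts, pvSplitP [] x.toList = t0 :: ts := by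
    cases e : pvSplitP [] x.toList with
    | nil => exact absurd e (pvSplitP_ne_nil x.toList [])
    | cons a b => exact ⟨a, b, rfl⟩
  have hx : x.toList = t0 ++ ts.flatMap (fun t => ' ' :: t) := by
    have h1 := pvSplitP_join x.toList []
    rw [hsplit, pvIntercalate_cons] at h1
    simpa using h1.symm
  have hsf := pvSplitP_spaceFree x.toList []
  rw [hsplit] at hsf
  have h0 : ∀ c ∈ t0, c ≠ ' ' := hsf (by simp) t0 (by simp)
  have hts : ∀ t ∈ ts, ∀ c ∈ t, c ≠ ' ' := fun t ht => hsf (by simp) t (by simp [ht])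
  have hB : shorten_street_alt x
      = String.ofList (PySem.Chars.strip
          (t0 ++ (ts.map (pvFix pvPairs)).flatMap (fun t => ' ' :: t))) := by
    unfold shorten_street_alt
    conv_lhs => rw [hx]
    rw [pvScan_copy t0 _ _ h0 (by simp)]
    rw [pvScan_tokens ts _ hts (by simp)]
  rw [hB]
  unfold shorten_street
  rw [hx, pvAFold, pvChain pvPairs t0 ts pvPairsCond h0 hts]
  rw [show ts.map (fun t => pvPairs.foldl (fun t p => pvPfx p.1 p.2 t) t)
        = ts.map (pvFix pvPairs) from
    List.map_congr_left (fun t _ => pvFoldPfx_eq_fix pvPairs pvPairsPairwise t)]
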